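-- pv_equiv track=rewrite | github.com/ryantalalai/python_classes | LAB1.py | joinList
-- ===== SOURCE A (Python) =====
-- def joinList(n):
--     if n < 1:
--         return None
--     else:
--         lst_1 = []
--         for num in range(1,n+1):
--             lst_1.append(num)
--         lst_2 = lst_1.copy()        #[1]
--         lst_2.reverse()             #[1]
--         final_lst = lst_1 + lst_2
--         return final_lst
-- ===== SOURCE B (Python) =====
-- def joinList(n):
--     if n < 1:
--         return None
--     return [i if i <= n else 2*n + 1 - i for i in range(1, 2*n + 1)]
-- ===== Notes on version B (the rewrite author's own statement) =====
-- stated objective: alternative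
-- what changed: B computes the 2n-element tent list in one comprehension over output positions with the closed form i if i<=n else 2n+1-i, instead of building [1..n] by appending, copying, reversing and concatenating.
import Mathlib
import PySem

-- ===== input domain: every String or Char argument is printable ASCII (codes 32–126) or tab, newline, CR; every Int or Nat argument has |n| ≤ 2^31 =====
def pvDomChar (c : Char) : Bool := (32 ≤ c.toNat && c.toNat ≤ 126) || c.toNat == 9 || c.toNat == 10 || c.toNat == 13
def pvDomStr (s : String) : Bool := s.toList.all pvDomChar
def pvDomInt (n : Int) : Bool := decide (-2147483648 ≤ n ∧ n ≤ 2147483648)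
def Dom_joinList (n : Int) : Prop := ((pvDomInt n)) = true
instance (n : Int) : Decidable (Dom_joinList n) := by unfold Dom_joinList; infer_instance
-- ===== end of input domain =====

-- B replaces A's build-copy-reverse-concatenate with one comprehension over output
-- positions using the closed form i if i ≤ n else 2n+1-i (alternative decomposition).

-- ===== PORT A =====
def joinList (n : Int) : Option (List Int) :=
  if n < 1 then none
  else
    let lst_1 := (PySem.List.pyRange 1 (n+1) 1).foldl (fun acc num => acc ++ [num]) []
    let lst_2 := lst_1.reverse
    some (lst_1 ++ lst_2)

-- ===== PORT B =====
def joinList_alt (n : Int) : Option (List Int) :=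
  if n < 1 then none
  else some ((PySem.List.pyRange 1 (2*n+1) 1).map (fun i => if i ≤ n then i else 2*n + 1 - i))

-- ===== PRECONDITION & SPEC =====
def Spec_joinList (n : Int) (out : Option (List Int)) : Prop := out = joinList_alt n
instance (n : Int) (out : Option (List Int)) : Decidable (Spec_joinList n out) := by unfold Spec_joinList; infer_instance

-- ===== CLAIM (what is proved, stated in full; the proofs are below) =====
def Claim_equal_joinList : Prop := ∀ (n : Int), Dom_joinList n → Spec_joinList n (joinList n)

-- ===== LEMMAS AND PROOFS =====

theorem foldl_append_id (l init : List Int) :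
    l.foldl (fun acc num => acc ++ [num]) init = init ++ l := by
  induction l generalizing init with
  | nil => simp
  | cons x xs ih => simp [List.foldl, ih, List.append_assoc]

theorem first_half_map (n : Int) :
    (PySem.List.pyRange 1 (n+1) 1).map (fun i => if i ≤ n then i else 2*n + 1 - i)
      = PySem.List.pyRange 1 (n+1) 1 := by
  conv_rhs => rw [← List.map_id (PySem.List.pyRange 1 (n+1) 1)]
  apply List.map_congr_left
  intro i hi
  rw [PySem.List.mem_pyRange_one] at hi
  have : i ≤ n := by omega
  simp [this]

theorem second_half_map (n : Int) (hn : 1 ≤ n) :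
    (PySem.List.pyRange (n+1) (2*n+1) 1).map (fun i => if i ≤ n then i else 2*n + 1 - i)
      = (PySem.List.pyRange 1 (n+1) 1).reverse := by
  have hrev := (PySem.List.pyRange_neg_one_eq_reverse n 0).symm
  norm_num at hrev
  rw [hrev]
  rw [PySem.List.pyRange_one, PySem.List.pyRange_neg_one]
  have h1 : (2*n+1 - (n+1)).toNat = n.toNat := by omega
  have h2 : (n - 0).toNat = n.toNat := by omega
  rw [h1, h2, List.map_map]
  apply List.map_congr_left
  intro k hk
  simp only [List.mem_range] at hk
  have : (k : Int) < n := by omega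
  simp only [Function.comp]
  have : ¬ (n + 1 + (k:Int) ≤ n) := by omega
  simp [this]
  omega

-- ===== VERDICT (by name: the statement is the Claim_ definition above) =====
theorem joinList_spec : Claim_equal_joinList := by
  intro n _
  unfold Spec_joinList joinList joinList_alt
  by_cases h : n < 1
  · simp [h]
  · simp only [h]
    have hn : 1 ≤ n := by omega
    rw [foldl_append_id]
    simp only [List.nil_append]
    rw [PySem.List.pyRange_one_append 1 (n+1) (2*n+1) (by omega) (by omega),
        List.map_append, first_half_map, second_half_map n hn]
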